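-- pv_equiv track=rewrite | github.com/rickardenglund/AoC2020 | days/24/day.py | setup_floor
-- ===== SOURCE A (Python) =====
-- def setup_floor(instructions):
--     blacks = set()
--     for i in instructions:
--         cube_coord = to_cube_coordinate(i)
--
--         if cube_coord in blacks:
--             blacks.remove(cube_coord)
--         else:
--             blacks.add(cube_coord)
--
--     return blacks
--
-- def to_cube_coordinate(instruction: list[str]) -> (int, int, int):
--     x, y, z = (0, 0, 0)
--     for i in instruction:
--         if i == 'e':
--             x += 1
--             y -= 1
--         elif i == 'w':
--             x -= 1
--             y += 1
--         elif i == 'nw':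
--             z -= 1
--             y += 1
--         elif i == 'se':
--             z += 1
--             y -= 1
--         elif i == 'ne':
--             x += 1
--             z -= 1
--         elif i == 'sw':
--             x -= 1
--             z += 1
--         else:
--             raise Exception('invalid direction', i)
--     return x, y, z
-- ===== SOURCE B (Python) =====
-- _DELTAS = {'e': (1, -1, 0), 'w': (-1, 1, 0), 'nw': (0, 1, -1),
--            'se': (0, -1, 1), 'ne': (1, 0, -1), 'sw': (-1, 0, 1)}
--
-- def to_cube_coordinate(instruction):
--     x, y, z = (0, 0, 0)
--     for d in instruction:
--         if d not in _DELTAS: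
--             raise Exception('invalid direction', d)
--         dx, dy, dz = _DELTAS[d]
--         x, y, z = x + dx, y + dy, z + dz
--     return (x, y, z)
--
-- def setup_floor(instructions):
--     # A tile ends up black iff it was flipped an odd number of times; keep the
--     # flip that was its final one (its last occurrence in the coordinate list).
--     coords = [to_cube_coordinate(i) for i in instructions]
--     return {c for k, c in enumerate(coords)
--             if c not in coords[k + 1:] and coords.count(c) % 2 == 1}
-- ===== Notes on version B (the rewrite author's own statement) =====
-- stated objective: alternative
-- what changed: B maps the instructions to their cube coordinates first (with a direction->delta table instead of an if-chain), then selects the black tiles in a separate filtering pass: a coordinate is kept at its last occurrence iff its total flip count is odd, replacing A's toggle-set-membership-while-scanning loop.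
import Mathlib
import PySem

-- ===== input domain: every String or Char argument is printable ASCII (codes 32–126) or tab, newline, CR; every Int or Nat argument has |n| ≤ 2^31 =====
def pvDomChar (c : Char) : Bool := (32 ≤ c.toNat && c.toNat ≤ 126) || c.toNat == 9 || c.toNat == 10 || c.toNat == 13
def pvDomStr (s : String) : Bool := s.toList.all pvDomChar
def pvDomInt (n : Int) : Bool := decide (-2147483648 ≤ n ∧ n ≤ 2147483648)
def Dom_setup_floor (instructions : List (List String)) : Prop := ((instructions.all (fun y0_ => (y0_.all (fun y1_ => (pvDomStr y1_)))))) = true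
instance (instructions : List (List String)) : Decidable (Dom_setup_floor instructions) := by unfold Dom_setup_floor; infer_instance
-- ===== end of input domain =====

-- B replaces A's toggle-set-membership-while-scanning loop by: map the instructions to
-- cube coordinates (via a direction->delta table instead of an if-chain), then a separate
-- filtering pass that keeps each coordinate at its last occurrence iff its total flip
-- count is odd; same return value, different decomposition (no speed claim).

-- ===== PORT A =====
def to_cube_coordinate (instruction : List String) : Option (Int × Int × Int) :=
  instruction.foldl
    (fun acc i =>
      match acc with
      | none => none
      | some (x, y, z) =>
        if i = "e" then some (x + 1, y - 1, z)
        else if i = "w" then some (x - 1, y + 1, z)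
        else if i = "nw" then some (x, y + 1, z - 1)
        else if i = "se" then some (x, y - 1, z + 1)
        else if i = "ne" then some (x + 1, y, z - 1)
        else if i = "sw" then some (x - 1, y, z + 1)
        else none)   -- none = Python's raise Exception('invalid direction', i); excluded by Pre_
    (some (0, 0, 0))

def setup_floor (instructions : List (List String)) : List (Int × Int × Int) :=
  instructions.foldl
    (fun blacks i =>
      match to_cube_coordinate i with
      | none => blacks   -- unreachable under Pre_ (Python propagates the exception)
      | some c =>
        if PySem.Set.contains blacks c then (PySem.Set.remove? blacks c).getD blacks
        else PySem.Set.add blacks c)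
    PySem.Set.empty

-- ===== PORT B =====
-- _DELTAS = {'e': (1,-1,0), ...}
def pvDeltas : PySem.Dict String (Int × Int × Int) :=
  ((((((PySem.Dict.empty.insert "e" (1, -1, 0)).insert "w" (-1, 1, 0)).insert
      "nw" (0, 1, -1)).insert "se" (0, -1, 1)).insert
      "ne" (1, 0, -1)).insert "sw" (-1, 0, 1))

def cube_of (instruction : List String) : Option (Int × Int × Int) :=
  instruction.foldl
    (fun acc d =>
      match acc with
      | none => none
      | some (x, y, z) =>
        match pvDeltas.get? d with
        | none => none   -- d not in _DELTAS: Python raises Exception('invalid direction', d); excluded by Pre_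
        | some (dx, dy, dz) => some (x + dx, y + dy, z + dz))
    (some (0, 0, 0))

def setup_floor_alt (instructions : List (List String)) : List (Int × Int × Int) :=
  let coords := instructions.map cube_of
  -- {c for k, c in enumerate(coords) if c not in coords[k+1:] and coords.count(c) % 2 == 1}
  -- (coords.count(c) is a nonnegative int, so Nat % is exact for the parity test)
  (PySem.List.enumerate coords).foldl
    (fun blacks p =>
      match p.2 with
      | none => blacks   -- unreachable under Pre_ (Python raised while building coords)
      | some c =>
        if some c ∉ PySem.List.slice coords (some (p.1 + 1)) none
            ∧ PySem.List.count coords (some c) % 2 = 1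
        then PySem.Set.add blacks c else blacks)
    PySem.Set.empty

-- ===== PRECONDITION & SPEC =====
-- Pre_ excludes exactly the inputs on which Python's A raises Exception('invalid direction', …).
def Pre_setup_floor (instructions : List (List String)) : Prop :=
  (instructions.all (fun i => i.all (fun s =>
    s == "e" || s == "w" || s == "nw" || s == "se" || s == "ne" || s == "sw"))) = true
instance (instructions : List (List String)) : Decidable (Pre_setup_floor instructions) := by
  unfold Pre_setup_floor; infer_instance

def pvWitness_setup_floor : List (List String) := [["e", "se"], ["w"], ["e", "se"], []]

def Spec_setup_floor (instructions : List (List String)) (out : List (Int × Int × Int)) : Prop := out = setup_floor_alt instructions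
instance (instructions : List (List String)) (out : List (Int × Int × Int)) : Decidable (Spec_setup_floor instructions out) := by unfold Spec_setup_floor; infer_instance

-- ===== CLAIM (what is proved, stated in full; the proofs are below) =====
def Claim_equal_setup_floor : Prop := ∀ (instructions : List (List String)), Dom_setup_floor instructions → Pre_setup_floor instructions → Spec_setup_floor instructions (setup_floor instructions)

-- ===== LEMMAS AND PROOFS =====

-- the two coordinate helpers agree
lemma cube_of_eq (i : List String) : cube_of i = to_cube_coordinate i := by
  unfold cube_of to_cube_coordinate
  congr 1
  funext acc d
  cases acc with
  | none => rfl
  | some t =>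
    obtain ⟨x, y, z⟩ := t
    show (match pvDeltas.get? d with
          | none => none
          | some (dx, dy, dz) => some (x + dx, y + dy, z + dz)) = _
    by_cases h1 : d = "e" <;> by_cases h2 : d = "w" <;> by_cases h3 : d = "nw" <;>
      by_cases h4 : d = "se" <;> by_cases h5 : d = "ne" <;> by_cases h6 : d = "sw" <;>
      simp_all [pvDeltas, PySem.Dict.get?_insert, PySem.Dict.get?_empty] <;> omega

-- A's loop body as a named step
def pvToggle (s : PySem.Set (Int × Int × Int)) (o : Option (Int × Int × Int)) :
    PySem.Set (Int × Int × Int) :=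
  match o with
  | none => s
  | some c =>
    if PySem.Set.contains s c then (PySem.Set.remove? s c).getD s
    else PySem.Set.add s c

-- what B's filtering pass picks at one enumerate entry
def pvPick (ds : List (Option (Int × Int × Int))) (p : Int × Option (Int × Int × Int)) :
    Option (Int × Int × Int) :=
  match p.2 with
  | none => none
  | some c =>
    if some c ∉ PySem.List.slice ds (some (p.1 + 1)) none
        ∧ PySem.List.count ds (some c) % 2 = 1
    then some c else none

def pvG (ds : List (Option (Int × Int × Int))) : List (Int × Int × Int) :=
  (PySem.List.enumerate ds).filterMap (pvPick ds)

lemma pvG_snoc_none (ds : List (Option (Int × Int × Int))) : pvG (ds ++ [none]) = pvG ds := by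
  unfold pvG
  rw [PySem.List.enumerate_append, List.filterMap_append]
  have h2 : (PySem.List.enumerate [(none : Option (Int × Int × Int))] (0 + ds.length)).filterMap
      (pvPick (ds ++ [none])) = [] := by
    simp [PySem.List.enumerate_cons, PySem.List.enumerate_nil, pvPick]
  rw [h2, List.append_nil]
  apply List.filterMap_congr
  intro p hp
  obtain ⟨k, hk, rfl⟩ := (PySem.List.mem_enumerate_iff ds 0 p).1 hp
  simp only [pvPick, zero_add]
  cases hdk : ds[k] with
  | none => rfl
  | some x =>
    have hs : ((k : Int) + 1) = ((k + 1 : Nat) : Int) := by push_cast; ring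
    rw [hs, PySem.List.slice_from_natCast, PySem.List.slice_from_natCast,
      List.drop_append_of_le_length (by omega)]
    simp [PySem.List.count_eq, List.count_append]

lemma pvG_snoc_some (ds : List (Option (Int × Int × Int))) (c : Int × Int × Int) :
    pvG (ds ++ [some c]) =
      (pvG ds).filter (fun x => !(x == c))
        ++ (if (ds.count (some c) + 1) % 2 = 1 then [c] else []) := by
  unfold pvG
  rw [PySem.List.enumerate_append, List.filterMap_append]
  have h2 : (PySem.List.enumerate [some c] (0 + ds.length)).filterMap
      (pvPick (ds ++ [some c])) = (if (ds.count (some c) + 1) % 2 = 1 then [c] else []) := by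
    simp only [PySem.List.enumerate_cons, PySem.List.enumerate_nil, List.filterMap_cons,
      List.filterMap_nil, pvPick]
    have hs : ((0 : Int) + (ds.length : Int) + 1) = ((ds.length + 1 : Nat) : Int) := by
      push_cast; ring
    rw [hs, PySem.List.slice_from_natCast]
    rw [List.drop_eq_nil_of_le (by simp)]
    simp only [PySem.List.count_eq, List.count_append, List.not_mem_nil,
      not_false_iff, true_and]
    by_cases h : (List.count (some c) ds + 1) % 2 = 1 <;> simp_all
  rw [h2]
  congr 1
  rw [List.filter_filterMap]
  apply List.filterMap_congr
  intro p hp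
  obtain ⟨k, hk, rfl⟩ := (PySem.List.mem_enumerate_iff ds 0 p).1 hp
  simp only [pvPick, zero_add]
  cases hdk : ds[k] with
  | none => rfl
  | some x =>
    have hs : ((k : Int) + 1) = ((k + 1 : Nat) : Int) := by push_cast; ring
    rw [hs, PySem.List.slice_from_natCast, PySem.List.slice_from_natCast,
      List.drop_append_of_le_length (by omega)]
    by_cases hxc : x = c
    · subst hxc
      simp only [PySem.List.count_eq, List.count_append, Option.filter]
      have hmem : some x ∈ ds.drop (k + 1) ++ [some x] := by simp
      by_cases h : some x ∉ ds.drop (k + 1) ∧ List.count (some x) ds % 2 = 1 <;>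
        simp [hmem, h]
    · simp only [PySem.List.count_eq, List.count_append, List.mem_append,
        List.mem_singleton, Option.some.injEq]
      have hne : (some x ≠ some c) := by simp [hxc]
      have hcx : ¬ c = x := fun h => hxc h.symm
      have hcnt : List.count (some x) [some c] = 0 := by
        simp [hcx]
      rw [hcnt]
      simp only [Nat.add_zero]
      by_cases hmem : some x ∈ ds.drop (k + 1) <;>
        by_cases hpar : List.count (some x) ds % 2 = 1 <;>
        simp [hmem, hpar, hxc, Option.filter]

lemma pvG_mem (ds : List (Option (Int × Int × Int))) (x : Int × Int × Int) :
    x ∈ pvG ds ↔ ds.count (some x) % 2 = 1 := by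
  induction ds using List.reverseRecOn with
  | nil => simp [pvG, PySem.List.enumerate_nil]
  | append_singleton ds o ih =>
    cases o with
    | none =>
      rw [pvG_snoc_none, ih]
      simp [List.count_append]
    | some c =>
      rw [pvG_snoc_some]
      by_cases hxc : x = c
      · subst hxc
        by_cases h : (List.count (some x) ds + 1) % 2 = 1 <;>
          simp [List.count_append, List.mem_filter, h]
      · have hne : (some x) ≠ (some c) := by simp [hxc]
        have h0 : List.count (some x) [some c] = 0 := by
          simp [hne.symm]
        by_cases h : (List.count (some c) ds + 1) % 2 = 1 <;>
          simp [List.count_append, h0, List.mem_filter, h, hxc, ih]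

lemma pvG_nodup (ds : List (Option (Int × Int × Int))) : (pvG ds).Nodup := by
  induction ds using List.reverseRecOn with
  | nil => simp [pvG, PySem.List.enumerate_nil]
  | append_singleton ds o ih =>
    cases o with
    | none => rw [pvG_snoc_none]; exact ih
    | some c =>
      rw [pvG_snoc_some]
      refine List.Nodup.append (ih.filter _) ?_ ?_
      · split <;> simp
      · intro a ha hb
        have := (List.mem_filter.1 ha).2
        split at hb <;> simp_all

lemma foldl_add_fresh {β : Type} (f : β → Option (Int × Int × Int)) (l : List β)
    (s : List (Int × Int × Int))
    (hnd : (l.filterMap f).Nodup) (hdisj : ∀ c ∈ l.filterMap f, c ∉ s) :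
    l.foldl (fun s b => match f b with | none => s | some c => PySem.Set.add s c) s
      = s ++ l.filterMap f := by
  induction l generalizing s with
  | nil => simp
  | cons b l ih =>
    rw [List.foldl_cons]
    cases hf : f b with
    | none =>
      simp only [List.filterMap_cons, hf] at hnd hdisj
      show List.foldl _ s l = _
      simp only [List.filterMap_cons, hf]
      exact ih s hnd hdisj
    | some c =>
      simp only [List.filterMap_cons, hf] at hnd hdisj
      have hcs : c ∉ s := hdisj c (by simp)
      show List.foldl _ (PySem.Set.add s c) l = _
      rw [PySem.Set.add_of_not_mem hcs]
      rw [ih (s ++ [c]) hnd.of_cons (fun a ha => by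
        simp only [List.mem_append, List.mem_singleton]
        rintro (h | rfl)
        · exact hdisj a (List.mem_cons_of_mem _ ha) h
        · exact (List.nodup_cons.1 hnd).1 ha)]
      simp [hf]

lemma toggle_fold_eq_pvG (ds : List (Option (Int × Int × Int))) :
    ds.foldl pvToggle PySem.Set.empty = pvG ds := by
  induction ds using List.reverseRecOn with
  | nil => simp [pvG, PySem.List.enumerate_nil, PySem.Set.empty]
  | append_singleton ds o ih =>
    rw [List.foldl_append, List.foldl_cons, List.foldl_nil, ih]
    cases o with
    | none => rw [pvG_snoc_none]; rfl
    | some c =>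
      rw [pvG_snoc_some]
      show (if PySem.Set.contains (pvG ds) c then (PySem.Set.remove? (pvG ds) c).getD (pvG ds)
            else PySem.Set.add (pvG ds) c) = _
      by_cases hmem : c ∈ pvG ds
      · have hpar := (pvG_mem ds c).1 hmem
        rw [if_pos (by rw [PySem.Set.contains_iff]; exact hmem)]
        rw [PySem.Set.remove?_of_mem hmem]
        have hp2 : ¬ (List.count (some c) ds + 1) % 2 = 1 := by omega
        simp only [hp2, if_false, List.append_nil, Option.getD_some]
        rfl
      · have hpar : ¬ List.count (some c) ds % 2 = 1 := fun h => hmem ((pvG_mem ds c).2 h)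
        rw [if_neg (by simp only [PySem.Set.contains_iff]; exact hmem)]
        rw [PySem.Set.add_of_not_mem hmem]
        have hp2 : (List.count (some c) ds + 1) % 2 = 1 := by omega
        rw [if_pos hp2]
        congr 1
        exact (List.filter_eq_self.2 (fun a ha => by
          have : a ≠ c := fun h => hmem (h ▸ ha)
          simp [this])).symm

lemma alt_eq_pvG (instructions : List (List String)) :
    setup_floor_alt instructions
      = pvG (instructions.map cube_of) := by
  set ds := instructions.map cube_of with hds
  show (PySem.List.enumerate ds).foldl
    (fun blacks p =>
      match p.2 with
      | none => blacks
      | some c =>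
        if some c ∉ PySem.List.slice ds (some (p.1 + 1)) none
            ∧ PySem.List.count ds (some c) % 2 = 1
        then PySem.Set.add blacks c else blacks)
    PySem.Set.empty = pvG ds
  have hstep : (fun (blacks : List (Int × Int × Int)) (p : Int × Option (Int × Int × Int)) =>
      match p.2 with
      | none => blacks
      | some c =>
        if some c ∉ PySem.List.slice ds (some (p.1 + 1)) none
            ∧ PySem.List.count ds (some c) % 2 = 1
        then PySem.Set.add blacks c else blacks)
    = (fun blacks p => match pvPick ds p with
       | none => blacks
       | some c => PySem.Set.add blacks c) := by
    funext blacks p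
    cases hp : p.2 with
    | none => simp [pvPick, hp]
    | some c =>
      simp only [pvPick, hp]
      split <;> rfl
  rw [hstep]
  rw [foldl_add_fresh (pvPick ds) _ _ (pvG_nodup ds) (by simp [PySem.Set.empty])]
  rfl

-- ===== VERDICT (by name: the statement is the Claim_ definition above) =====
theorem setup_floor_spec : Claim_equal_setup_floor := by
  intro instructions _ _
  show setup_floor instructions = setup_floor_alt instructions
  have hA : setup_floor instructions
      = (instructions.map to_cube_coordinate).foldl pvToggle PySem.Set.empty := by
    unfold setup_floor
    rw [List.foldl_map]
    rfl
  rw [hA, alt_eq_pvG]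
  have hmap : instructions.map cube_of = instructions.map to_cube_coordinate :=
    List.map_congr_left (fun i _ => cube_of_eq i)
  rw [hmap, toggle_fold_eq_pvG]
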